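-- pv_equiv track=rewrite | github.com/dbretaud/ProjectQ | projectq/backends/_pasqal/_pasqal.py | _format_counts
-- ===== SOURCE A (Python) =====
-- def _rearrange_result(input_result, length):
--     bin_input = list(bin(input_result)[2:].rjust(length, '0'))
--     return ''.join(bin_input)[::-1]
--
-- def _format_counts(samples, length):
--     counts = {}
--     for result in samples:
--         h_result = _rearrange_result(result, length)
--         if h_result not in counts:
--             counts[h_result] = 1
--         else:
--             counts[h_result] += 1
--     counts = {
--         k: v
--         for k, v in sorted(counts.items(), key=lambda item: item[0])
--     }
--     return counts
-- ===== SOURCE B (Python) =====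
-- def _rearrange_result(input_result, length):
--     bin_input = list(bin(input_result)[2:].rjust(length, '0'))
--     return ''.join(bin_input)[::-1]
--
-- def _format_counts(samples, length):
--     # Sort the formatted samples once, then count consecutive runs:
--     # the result dict is built directly in ascending key order.
--     formatted = sorted(_rearrange_result(r, length) for r in samples)
--     counts = {}
--     i, n = 0, len(formatted)
--     while i < n:
--         j = i + 1
--         while j < n and formatted[j] == formatted[i]:
--             j += 1
--         counts[formatted[i]] = j - i
--         i = j
--     return counts
-- ===== Notes on version B (the rewrite author's own statement) =====
-- stated objective: alternative
-- what changed: B formats all samples, sorts the formatted strings once, and builds the result by counting consecutive equal runs of the sorted list (so it is emitted directly in ascending key order), instead of A's incremental dict counting followed by sorting the dict items and rebuilding the dict.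
import Mathlib
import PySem

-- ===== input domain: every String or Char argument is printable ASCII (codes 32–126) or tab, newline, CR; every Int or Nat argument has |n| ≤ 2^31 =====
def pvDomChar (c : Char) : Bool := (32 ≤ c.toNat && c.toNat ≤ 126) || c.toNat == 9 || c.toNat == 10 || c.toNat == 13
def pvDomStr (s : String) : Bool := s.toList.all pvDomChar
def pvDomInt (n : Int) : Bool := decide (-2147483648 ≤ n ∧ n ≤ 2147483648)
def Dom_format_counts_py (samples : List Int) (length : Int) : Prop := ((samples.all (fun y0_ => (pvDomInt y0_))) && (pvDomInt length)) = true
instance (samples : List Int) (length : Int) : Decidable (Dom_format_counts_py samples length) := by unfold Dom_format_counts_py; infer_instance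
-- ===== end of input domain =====

-- B sorts the formatted samples once and counts consecutive runs instead of building a
-- dict incrementally and re-sorting its items (objective: alternative decomposition).

-- ===== PORT A =====
-- _rearrange_result (shared verbatim by A and B); .rjust(length, '0') is ported by hand:
-- pad count = max(0, length - len(s)), exact since bin(n)[2:] never starts with a sign.
def rearrange_result (input_result : Int) (length : Int) : String :=
  let bin_input : List Char := PySem.List.slice (PySem.Int.toBinChars0b input_result) (some 2) none
  let padded : List Char := List.replicate (length.toNat - bin_input.length) '0' ++ bin_input
  String.ofList padded.reverse    -- ''.join(...)[::-1]

def format_counts_py (samples : List Int) (length : Int) : List (String × Int) :=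
  let counts : PySem.Dict String Int := samples.foldl (fun d result =>
    let h_result := rearrange_result result length
    if d.contains h_result then d.insert h_result (d.getD h_result 0 + 1)
    else d.insert h_result 1) PySem.Dict.empty
  let sortedItems := PySem.List.sorted counts.items (fun item => item.1)
  let counts2 : PySem.Dict String Int := sortedItems.foldl (fun d p => d.insert p.1 p.2) PySem.Dict.empty
  counts2.items

-- ===== PORT B =====
-- the run-length grouping loop of Source B (outer/inner while): emit (key, run length), continue after the run
def groupRuns : List String → List (String × Int)
  | [] => []
  | x :: xs =>
    (x, ((xs.takeWhile (· == x)).length + 1 : Int)) :: groupRuns (xs.dropWhile (· == x))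
  termination_by l => l.length
  decreasing_by simpa using Nat.lt_succ_of_le (List.length_dropWhile_le _ _)

def format_counts_py_alt (samples : List Int) (length : Int) : List (String × Int) :=
  let formatted := PySem.List.sorted (samples.map (fun r => rearrange_result r length)) (fun s => s)
  groupRuns formatted

-- ===== PRECONDITION & SPEC =====
def Spec_format_counts_py (samples : List Int) (length : Int) (out : List (String × Int)) : Prop := out = format_counts_py_alt samples length
instance (samples : List Int) (length : Int) (out : List (String × Int)) : Decidable (Spec_format_counts_py samples length out) := by unfold Spec_format_counts_py; infer_instance

-- ===== CLAIM (what is proved, stated in full; the proofs are below) =====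
def Claim_equal_format_counts_py : Prop := ∀ (samples : List Int) (length : Int), Dom_format_counts_py samples length → Spec_format_counts_py samples length (format_counts_py samples length)

-- ===== LEMMAS AND PROOFS =====

-- A's counting loop is Counter(formatted samples)
theorem foldA_eq_counter (samples : List Int) (length : Int) :
    samples.foldl (fun d result =>
      let h_result := rearrange_result result length
      if d.contains h_result then d.insert h_result (d.getD h_result 0 + 1)
      else d.insert h_result 1) PySem.Dict.empty
    = PySem.Dict.counter (samples.map (fun r => rearrange_result r length)) := by
  rw [← PySem.Dict.foldl_insert_getD_add_one_eq_counter, List.foldl_map]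
  apply PySem.List.foldl_congr_mem
  intro d r _
  by_cases hc : d.contains (rearrange_result r length) = true
  · simp [hc]
  · have hc' : d.contains (rearrange_result r length) = false := by simpa using hc
    simp only [hc', Bool.false_eq_true, if_neg, not_false_eq_true]
    rw [d.getD_of_not_contains 0 hc']
    norm_num

-- Set.ofList helpers for a run decomposition
theorem foldl_add_skip (r : List String) (s : PySem.Set String)
    (h : ∀ y ∈ r, s.contains y = true) : List.foldl PySem.Set.add s r = s := by
  induction r with
  | nil => rfl
  | cons y ys ih =>
    have hy := h y (List.mem_cons_self)
    simp only [List.foldl_cons, PySem.Set.add, hy, if_pos]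
    exact ih (fun z hz => h z (List.mem_cons_of_mem _ hz))

theorem foldl_add_cons (t : List String) : ∀ (x : String) (s : List String), x ∉ t →
    List.foldl PySem.Set.add (x :: s) t = x :: List.foldl PySem.Set.add s t := by
  induction t with
  | nil => intro x s _; rfl
  | cons y ys ih =>
    intro x s hx
    have hyx : (y == x) = false := by
      simp only [beq_eq_false_iff_ne]
      intro h; exact hx (h ▸ List.mem_cons_self)
    have hcons : (PySem.Set.contains (x :: s) y) = PySem.Set.contains s y := by
      show List.contains (x :: s) y = List.contains s y
      simp only [List.contains_cons, hyx, Bool.false_or]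
    by_cases hc : PySem.Set.contains s y = true
    · simp only [List.foldl_cons, PySem.Set.add, hcons, hc, if_pos]
      exact ih x s (fun h => hx (List.mem_cons_of_mem _ h))
    · simp only [List.foldl_cons, PySem.Set.add, hcons, hc, if_neg, Bool.false_eq_true,
        not_false_eq_true, List.cons_append]
      exact ih x (s ++ [y]) (fun h => hx (List.mem_cons_of_mem _ h))

theorem ofList_run_cons (x : String) (r t : List String)
    (hr : ∀ y ∈ r, y = x) (ht : x ∉ t) :
    PySem.Set.ofList (x :: (r ++ t)) = x :: PySem.Set.ofList t := by
  show List.foldl PySem.Set.add PySem.Set.empty (x :: (r ++ t)) = _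
  rw [List.foldl_cons, List.foldl_append]
  have h1 : PySem.Set.add PySem.Set.empty x = [x] := rfl
  rw [h1, foldl_add_skip r [x] (by
    intro y hy
    simp [PySem.Set.contains, hr y hy])]
  exact foldl_add_cons t x [] ht

-- main characterisation: on a non-decreasing list, the run-length grouping is
-- (first-occurrence distinct keys, count); those keys are strictly increasing
theorem groupRuns_sorted : ∀ (n : Nat) (ss : List String), ss.length ≤ n →
    List.Pairwise (· ≤ ·) ss →
    groupRuns ss = (PySem.Set.ofList ss).map (fun k => (k, (ss.count k : Int))) ∧
      List.Pairwise (· < ·) (PySem.Set.ofList ss) := by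
  intro n
  induction n with
  | zero =>
    intro ss hlen _
    have : ss = [] := List.eq_nil_of_length_eq_zero (Nat.le_zero.mp hlen)
    subst this
    exact ⟨by simp [groupRuns], List.Pairwise.nil⟩
  | succ n ih =>
    intro ss hlen hp
    cases ss with
    | nil => exact ⟨by simp [groupRuns], List.Pairwise.nil⟩
    | cons x xs =>
      have hpx : ∀ y ∈ xs, x ≤ y := (List.pairwise_cons.mp hp).1
      have hpxs : List.Pairwise (· ≤ ·) xs := (List.pairwise_cons.mp hp).2
      have hrt : xs.takeWhile (· == x) ++ xs.dropWhile (· == x) = xs :=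
        List.takeWhile_append_dropWhile
      have hr : ∀ y ∈ xs.takeWhile (· == x), y = x :=
        fun y hy => eq_of_beq (List.mem_takeWhile_imp (p := fun z => z == x) hy)
      have hpt : List.Pairwise (· ≤ ·) (xs.dropWhile (· == x)) :=
        List.Pairwise.sublist (List.dropWhile_sublist _) hpxs
      have hxt : ∀ y ∈ xs.dropWhile (· == x), x < y := by
        cases htc : xs.dropWhile (· == x) with
        | nil => simp
        | cons h t' =>
          have hhxs : h ∈ xs := (List.dropWhile_sublist _).mem (htc ▸ List.mem_cons_self)
          have hhx : (h == x) = false := by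
            have hne : xs.dropWhile (· == x) ≠ [] := by simp [htc]
            have h2 := List.head_dropWhile_not (· == x) hne
            simp [htc] at h2
            simpa using h2
          have hxh : x < h := lt_of_le_of_ne (hpx h hhxs) (fun he => by simp [← he] at hhx)
          intro y hy
          rcases List.mem_cons.mp hy with rfl | hy'
          · exact hxh
          · exact lt_of_lt_of_le hxh ((List.pairwise_cons.mp (htc ▸ hpt)).1 y hy')
      have hxnt : x ∉ xs.dropWhile (· == x) := fun h => lt_irrefl x (hxt x h)
      have hlent : (xs.dropWhile (· == x)).length ≤ n := by
        have h1 := List.length_dropWhile_le (· == x) xs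
        have h2 : xs.length ≤ n := Nat.le_of_succ_le_succ hlen
        omega
      obtain ⟨ihg, ihp⟩ := ih (xs.dropWhile (· == x)) hlent hpt
      have hof : PySem.Set.ofList (x :: xs) = x :: PySem.Set.ofList (xs.dropWhile (· == x)) := by
        conv_lhs => rw [← hrt]
        exact ofList_run_cons x _ _ hr hxnt
      have hcx : (x :: xs).count x = (xs.takeWhile (· == x)).length + 1 := by
        have h1 : (xs.takeWhile (· == x)).count x = (xs.takeWhile (· == x)).length :=
          List.count_eq_length.mpr (fun b hb => (hr b hb).symm)
        have h2 : (xs.dropWhile (· == x)).count x = 0 := List.count_eq_zero.mpr hxnt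
        have e0 : (xs.takeWhile (· == x) ++ xs.dropWhile (· == x)).count x = xs.count x := by
          rw [hrt]
        simp only [List.count_append, h1, h2, Nat.add_zero] at e0
        rw [List.count_cons_self, ← e0]
      have hck : ∀ k ∈ xs.dropWhile (· == x), (x :: xs).count k = (xs.dropWhile (· == x)).count k := by
        intro k hk
        have hkx : ¬ x = k := fun he => lt_irrefl x (he ▸ hxt k hk)
        have h1 : (xs.takeWhile (· == x)).count k = 0 :=
          List.count_eq_zero.mpr (fun hkr => hkx (hr k hkr).symm)
        have e0 : (xs.takeWhile (· == x) ++ xs.dropWhile (· == x)).count k = xs.count k := by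
          rw [hrt]
        simp only [List.count_append, h1, Nat.zero_add] at e0
        simp [e0, hkx]
      constructor
      · rw [groupRuns, ihg, hof, List.map_cons]
        congr 1
        · simp [hcx]
        · exact List.map_congr_left
            (fun k hk => by rw [hck k ((PySem.Set.mem_ofList _ k).mp hk)])
      · rw [hof]
        exact List.pairwise_cons.mpr
          ⟨fun k hk => hxt k ((PySem.Set.mem_ofList _ k).mp hk), ihp⟩

-- ===== VERDICT (by name: the statement is the Claim_ definition above) =====
theorem format_counts_py_spec : Claim_equal_format_counts_py := by
  intro samples length _
  show format_counts_py samples length = format_counts_py_alt samples length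
  unfold format_counts_py format_counts_py_alt
  simp only [foldA_eq_counter, PySem.Dict.items_counter]
  set l := samples.map (fun r => rearrange_result r length) with hl
  set ss := PySem.List.sorted l (fun s => s) with hss
  have hsslen : ss.length ≤ ss.length := le_refl _
  have hsp : List.Pairwise (· ≤ ·) ss := PySem.List.sorted_pairwise l (fun s => s)
  obtain ⟨hg, hlt⟩ := groupRuns_sorted ss.length ss hsslen hsp
  -- sorted set of l = first-occurrence set of sorted l
  have hperm : (PySem.Set.ofList ss).Perm (PySem.Set.ofList l) := by
    rw [List.perm_ext_iff_of_nodup (PySem.Set.nodup_ofList _) (PySem.Set.nodup_ofList _)]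
    intro a
    rw [PySem.Set.mem_ofList, PySem.Set.mem_ofList, hss, PySem.List.mem_sorted]
  have hS : PySem.List.sorted (PySem.Set.ofList l) (fun x => x) = PySem.Set.ofList ss :=
    PySem.List.sorted_eq_of_perm_of_pairwise_lt _ _ _ hperm hlt
  -- A's sort of the counter items is the counter of the sorted keys
  have hA : PySem.List.sorted ((PySem.Set.ofList l).map (fun k => (k, (l.count k : Int))))
      (fun item => item.1)
      = (PySem.Set.ofList ss).map (fun k => (k, (l.count k : Int))) := by
    apply PySem.List.sorted_eq_of_perm_of_pairwise_lt
    · rw [← hS]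
      exact (PySem.List.sorted_perm (PySem.Set.ofList l) (fun x => x) false).map _
    · rw [← hS]
      exact List.Pairwise.map _ (fun a b h => h) (PySem.List.sorted_ofList_pairwise_lt l)
  rw [hA]
  -- rebuilding the dict from strictly-increasing distinct keys keeps the item list
  rw [PySem.Dict.items_foldl_insert_fresh _ Prod.fst Prod.snd PySem.Dict.empty
    (fun a _ => PySem.Dict.contains_empty _)
    (by
      rw [List.map_map]
      have hcomp : List.map (Prod.fst ∘ fun k => (k, (l.count k : Int))) (PySem.Set.ofList ss)
          = PySem.Set.ofList ss := by simp [Function.comp_def]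
      rw [hcomp]
      exact PySem.Set.nodup_ofList _)]
  rw [hg]
  simp only [List.map_map]
  apply List.map_congr_left
  intro k hk
  have : ss.count k = l.count k := (PySem.List.sorted_perm l (fun s => s) false).count_eq k
  simp [this]
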